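-- pv_equiv track=rewrite | github.com/RawRapter/python-vscode | ProgPracFol/BasicsProgramSet5.py | ReplaceDuplicate
-- ===== SOURCE A (Python) =====
-- def ReplaceDuplicate(x):
--     split1 = x.split()
--     replace_dict = {'anant':'he','PEC':'it'}
--     newr = set()
--     for idx,ele in enumerate(split1):
--         if ele in newr:
--             split1[idx] = replace_dict[ele]
--         else:
--             newr.add(ele)
--     newr = ' '.join(split1)
--     return newr
-- ===== SOURCE B (Python) =====
-- def ReplaceDuplicate(x):
--     words = x.split()
--     replace_dict = {'anant': 'he', 'PEC': 'it'}
--     first = {}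
--     for idx, w in enumerate(words):
--         if w not in first:
--             first[w] = idx
--     out = []
--     for idx, w in enumerate(words):
--         out.append(w if first[w] == idx else replace_dict[w])
--     return ' '.join(out)
-- ===== Notes on version B (the rewrite author's own statement) =====
-- stated objective: alternative
-- what changed: Instead of A's single pass that mutates the split list in place while tracking a seen-set, B first builds a dict mapping each word to the index of its first occurrence and then rebuilds the word list with a pure second pass (keep a word iff it is its own first occurrence, else look up the replacement).
import Mathlib
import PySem

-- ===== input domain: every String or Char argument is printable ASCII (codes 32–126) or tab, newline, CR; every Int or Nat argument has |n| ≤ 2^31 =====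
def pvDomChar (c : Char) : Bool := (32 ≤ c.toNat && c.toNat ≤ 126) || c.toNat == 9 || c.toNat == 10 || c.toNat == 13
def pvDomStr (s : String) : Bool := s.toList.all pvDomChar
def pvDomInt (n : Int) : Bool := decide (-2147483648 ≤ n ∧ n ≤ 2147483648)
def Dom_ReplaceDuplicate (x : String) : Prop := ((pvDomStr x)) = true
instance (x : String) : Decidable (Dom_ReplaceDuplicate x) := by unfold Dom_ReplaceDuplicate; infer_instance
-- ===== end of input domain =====

-- B replaces A's single in-place-mutating pass (seen-set + list assignment) by two pure passes:
-- a first-occurrence index dict, then a rebuild of the word list; same cost, different structure.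


-- ===== PORT A =====
-- replace_dict = {'anant':'he','PEC':'it'} (shared literal; both Pythons define the same dict)
def pvRd : PySem.Dict String String := PySem.Dict.ofList [("anant", "he"), ("PEC", "it")]

-- one iteration of A's for-loop: state = (the mutating list split1, the seen-set newr).
-- replace_dict[ele] (KeyError possible) is total here via getD — Pre_ below excludes the
-- raising inputs.
def pvStepA (st : List String × PySem.Set String) (p : Int × String) :
    List String × PySem.Set String :=
  if PySem.Set.contains st.2 p.2 then
    (PySem.List.pySetD st.1 p.1 (PySem.Dict.getD pvRd p.2 ""), st.2)
  else
    (st.1, PySem.Set.add st.2 p.2)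

-- split1[idx] is only assigned at the index just read, so iterating `enumerate split1` of
-- the original list is exact for Python's enumerate over the mutating list.
def ReplaceDuplicate (x : String) : String :=
  let split1 := PySem.Str.split₀ x
  PySem.Str.join " " ((PySem.List.enumerate split1).foldl pvStepA (split1, PySem.Set.empty)).1

-- ===== PORT B =====
-- pass 1 of B, one iteration: if w not in first: first[w] = idx
def pvStepB (d : PySem.Dict String Int) (p : Int × String) : PySem.Dict String Int :=
  if !(PySem.Dict.contains d p.2) then PySem.Dict.insert d p.2 p.1 else d

def pvFirst (words : List String) : PySem.Dict String Int :=
  (PySem.List.enumerate words).foldl pvStepB PySem.Dict.empty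

-- pass 2 of B, the appended element: w if first[w] == idx else replace_dict[w]
-- (replace_dict[w] total here via getD — Pre_ excludes the raising inputs)
def pvPick (first : PySem.Dict String Int) (p : Int × String) : String :=
  if PySem.Dict.getD first p.2 (-1) == p.1 then p.2 else PySem.Dict.getD pvRd p.2 ""

def ReplaceDuplicate_alt (x : String) : String :=
  let words := PySem.Str.split₀ x
  let first := pvFirst words
  PySem.Str.join " " ((PySem.List.enumerate words).map (pvPick first))

-- ===== PRECONDITION & SPEC =====
-- Pre_ excludes exactly the inputs on which Python A raises KeyError: a word that occurs
-- more than once in x.split() and is not a key of {'anant','PEC'} (B raises there too).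
def Pre_ReplaceDuplicate (x : String) : Prop :=
  ∀ w ∈ PySem.Str.split₀ x,
    (PySem.Str.split₀ x).count w ≤ 1 ∨ w = "anant" ∨ w = "PEC"
instance (x : String) : Decidable (Pre_ReplaceDuplicate x) := by
  unfold Pre_ReplaceDuplicate; infer_instance

def pvWitness_ReplaceDuplicate : String := "anant is anant"

def Spec_ReplaceDuplicate (x : String) (out : String) : Prop := out = ReplaceDuplicate_alt x
instance (x : String) (out : String) : Decidable (Spec_ReplaceDuplicate x out) := by
  unfold Spec_ReplaceDuplicate; infer_instance

-- ===== CLAIM (what is proved, stated in full; the proofs are below) =====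
def Claim_equal_ReplaceDuplicate : Prop :=
  ∀ (x : String), Dom_ReplaceDuplicate x → Pre_ReplaceDuplicate x →
    Spec_ReplaceDuplicate x (ReplaceDuplicate x)

-- ===== LEMMAS AND PROOFS =====

-- canonical one-pass description both ports are reduced to
def pvCanon (s : PySem.Set String) : List String → List String
  | [] => []
  | w :: rest =>
      if PySem.Set.contains s w then PySem.Dict.getD pvRd w "" :: pvCanon s rest
      else w :: pvCanon (PySem.Set.add s w) rest

theorem pvStepA_mem (st : List String × PySem.Set String) (p : Int × String)
    (h : p.2 ∈ st.2) :
    pvStepA st p = (PySem.List.pySetD st.1 p.1 (PySem.Dict.getD pvRd p.2 ""), st.2) := by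
  unfold pvStepA
  rw [if_pos ((PySem.Set.contains_iff _ _).mpr h)]

theorem pvStepA_not_mem (st : List String × PySem.Set String) (p : Int × String)
    (h : p.2 ∉ st.2) : pvStepA st p = (st.1, PySem.Set.add st.2 p.2) := by
  unfold pvStepA
  rw [if_neg (fun hc => h ((PySem.Set.contains_iff _ _).mp hc))]

-- A's fold, with the processed prefix made explicit
theorem pvFoldA (rest : List String) : ∀ (done : List String) (s : PySem.Set String),
    ((PySem.List.enumerate rest (done.length : Int)).foldl pvStepA (done ++ rest, s)).1
      = done ++ pvCanon s rest := by
  induction rest with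
  | nil => intro done s; simp [pvCanon]
  | cons w rest ih =>
    intro done s
    rw [PySem.List.enumerate_cons, List.foldl_cons]
    by_cases hc : w ∈ s
    · have hset : PySem.List.pySetD (done ++ w :: rest) (done.length : Int)
          (PySem.Dict.getD pvRd w "") = done ++ PySem.Dict.getD pvRd w "" :: rest := by
        rw [PySem.List.pySetD_natCast, List.set_append_right _ _ (le_refl _)]
        simp
      rw [pvStepA_mem _ _ hc, hset,
        show done ++ PySem.Dict.getD pvRd w "" :: rest
            = (done ++ [PySem.Dict.getD pvRd w ""]) ++ rest by simp,
        show ((done.length : Int) + 1) = (((done ++ [PySem.Dict.getD pvRd w ""]).length : Int))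
          by simp,
        ih]
      simp [pvCanon, hc]
    · rw [pvStepA_not_mem _ _ hc,
        show done ++ w :: rest = (done ++ [w]) ++ rest by simp,
        show ((done.length : Int) + 1) = (((done ++ [w]).length : Int)) by simp,
        ih]
      simp [pvCanon, hc]

theorem pvStepB_contains (d : PySem.Dict String Int) (p : Int × String)
    (h : PySem.Dict.contains d p.2 = true) : pvStepB d p = d := by
  unfold pvStepB
  rw [h]
  rfl

theorem pvStepB_not_contains (d : PySem.Dict String Int) (p : Int × String)
    (h : PySem.Dict.contains d p.2 = false) :
    pvStepB d p = PySem.Dict.insert d p.2 p.1 := by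
  unfold pvStepB
  rw [h]
  rfl

-- B's first-occurrence dict, characterised by index?
theorem pvDictB (ws : List String) : ∀ (k : Int) (d : PySem.Dict String Int) (w : String),
    PySem.Dict.get? ((PySem.List.enumerate ws k).foldl pvStepB d) w
    = if PySem.Dict.contains d w then PySem.Dict.get? d w
      else (PySem.List.index? ws w).map (fun i => k + (i : Int)) := by
  induction ws with
  | nil =>
    intro k d w
    split_ifs with h
    · simp [PySem.List.enumerate_nil]
    · simp only [PySem.List.enumerate_nil, List.foldl_nil]
      rw [(PySem.Dict.get?_eq_none_iff_contains _ _).mpr (by simpa using h)]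
      simp [PySem.List.index?]
  | cons v ws ih =>
    intro k d w
    rw [PySem.List.enumerate_cons, List.foldl_cons]
    by_cases hv : PySem.Dict.contains d v
    · rw [pvStepB_contains _ _ hv, ih]
      by_cases hw : PySem.Dict.contains d w
      · simp [hw]
      · have hne : v ≠ w := fun h => (by simp [hw] : ¬ _) (h ▸ hv)
        rw [PySem.List.index?_cons_of_ne _ hne]
        rw [if_neg (by simp [hw]), if_neg (by simp [hw])]
        cases PySem.List.index? ws w with
        | none => rfl
        | some i => simp only [Option.map_some]; norm_num; ring
    · rw [pvStepB_not_contains _ _ (by simpa using hv), ih]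
      by_cases hwv : w = v
      · subst hwv
        rw [if_pos (PySem.Dict.contains_insert_self _ _ _),
          PySem.Dict.get?_insert_self, PySem.List.index?_cons_self]
        simp [hv]
      · have hc : PySem.Dict.contains (PySem.Dict.insert d v k) w = PySem.Dict.contains d w := by
          rw [PySem.Dict.contains_insert]
          simp [hwv]
        rw [hc, PySem.Dict.get?_insert_of_ne _ _ hwv,
          PySem.List.index?_cons_of_ne _ (Ne.symm hwv)]
        by_cases hw : PySem.Dict.contains d w
        · simp [hw]
        · rw [if_neg (by simp [hw]), if_neg (by simp [hw])]
          cases PySem.List.index? ws w with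
          | none => rfl
          | some i => simp only [Option.map_some]; norm_num; ring

-- index? of the first element after a prefix it does not occur in
theorem pvIndexEq (pre suf : List String) (w : String) (hw : w ∉ pre) :
    PySem.List.index? (pre ++ w :: suf) w = some pre.length := by
  rw [PySem.List.index?_eq_some_iff]
  exact ⟨pre, suf, rfl, rfl, hw⟩

theorem pvIndexNe (pre suf : List String) (w : String) (hw : w ∈ pre) (k : Nat)
    (hk : PySem.List.index? (pre ++ w :: suf) w = some k) : k ≠ pre.length := by
  rw [PySem.List.index?_eq_some_iff] at hk
  obtain ⟨p2, s2, heq, hlen, hnm⟩ := hk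
  intro hkl
  have : p2 = pre := List.append_inj_left heq.symm (by omega)
  exact hnm (this ▸ hw)

-- B's second pass equals pvCanon
theorem pvMapB (ws : List String) (rest : List String) : ∀ (pre : List String)
    (s : PySem.Set String), ws = pre ++ rest → (∀ v, v ∈ s ↔ v ∈ pre) →
    (PySem.List.enumerate rest (pre.length : Int)).map (pvPick (pvFirst ws))
      = pvCanon s rest := by
  induction rest with
  | nil => intro pre s hws hs; simp [pvCanon]
  | cons w rest ih =>
    intro pre s hws hs
    rw [PySem.List.enumerate_cons, List.map_cons]
    have hget : PySem.Dict.get? (pvFirst ws) w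
        = (PySem.List.index? ws w).map (fun i => (i : Int)) := by
      unfold pvFirst
      rw [pvDictB]
      simp [PySem.Dict.contains_empty]
    by_cases hwp : w ∈ pre
    · -- duplicate: first[w] < |pre|, so the lookup differs from the index
      obtain ⟨k, hk⟩ : ∃ k, PySem.List.index? ws w = some k := by
        have : w ∈ ws := hws ▸ List.mem_append_left _ hwp
        exact Option.isSome_iff_exists.mp ((PySem.List.index?_isSome_iff _ _).mpr this)
      have hkne : k ≠ pre.length := pvIndexNe pre rest w hwp k (hws ▸ hk)
      have hgd : PySem.Dict.getD (pvFirst ws) w (-1) = (k : Int) := by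
        rw [PySem.Dict.getD_eq_get?_getD, hget, hk]
        rfl
      have hpick : pvPick (pvFirst ws) ((pre.length : Int), w) = PySem.Dict.getD pvRd w "" := by
        unfold pvPick
        rw [if_neg]
        simp only [hgd, beq_iff_eq, Int.natCast_inj]
        exact_mod_cast hkne
      rw [hpick,
        show ((pre.length : Int) + 1) = (((pre ++ [w]).length : Int)) by simp,
        ih (pre ++ [w]) s (by simp [hws]) (fun v => by
          rw [hs v]
          constructor
          · exact fun h => List.mem_append_left _ h
          · intro h
            rcases List.mem_append.mp h with h | h
            · exact h
            · simp at h; subst h; exact hwp)]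
      have hwp' : w ∈ s := (hs w).mpr hwp
      simp [pvCanon, hwp']
    · -- first occurrence: first[w] = |pre|
      have hk : PySem.List.index? ws w = some pre.length := hws ▸ pvIndexEq pre rest w hwp
      have hgd : PySem.Dict.getD (pvFirst ws) w (-1) = (pre.length : Int) := by
        rw [PySem.Dict.getD_eq_get?_getD, hget, hk]
        rfl
      have hpick : pvPick (pvFirst ws) ((pre.length : Int), w) = w := by
        unfold pvPick
        rw [if_pos]
        simp [hgd]
      rw [hpick,
        show ((pre.length : Int) + 1) = (((pre ++ [w]).length : Int)) by simp,
        ih (pre ++ [w]) (PySem.Set.add s w) (by simp [hws]) (fun v => by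
          rw [PySem.Set.mem_add, hs v]
          simp)]
      have hns : w ∉ s := fun h => hwp ((hs w).mp h)
      simp [pvCanon, hns]

-- ===== VERDICT (by name: the statement is the Claim_ definition above) =====
theorem ReplaceDuplicate_spec : Claim_equal_ReplaceDuplicate := by
  intro x _ _
  unfold Spec_ReplaceDuplicate ReplaceDuplicate ReplaceDuplicate_alt
  simp only
  congr 1
  have hA := pvFoldA (PySem.Str.split₀ x) [] PySem.Set.empty
  have hB := pvMapB (PySem.Str.split₀ x) (PySem.Str.split₀ x) [] PySem.Set.empty rfl
    (fun v => by simp [PySem.Set.empty])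
  simp only [List.nil_append, List.length_nil, Int.natCast_zero] at hA hB
  rw [hA, hB]
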